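-- pv_equiv track=rewrite | github.com/robingauthier/IdxSEC | extract_structure_form.py | score_text_list
-- ===== SOURCE A (Python) =====
-- def score_text_list(txtloc,lpos,lneg):
--     txtlocl = txtloc.lower()
--     scorep=0
--     scoren = 0
--     for wpos in lpos:
--         scorep+=txtlocl.count(wpos)
--     for wneg in lneg:
--         scoren+=txtlocl.count(wneg)
--     return {'scorep':scorep,'scoren':scoren}
-- ===== SOURCE B (Python) =====
-- def score_text_list(txtloc, lpos, lneg):
--     # Shared multi-pattern scan: one pass over the text per distinct word length,
--     # hashing the slice at each start position and counting greedily
--     # non-overlapping occurrences per word.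
--     text = txtloc.lower()
--     n = len(text)
--     counts = dict.fromkeys(lpos + lneg, 0)
--     next_start = dict.fromkeys(counts, 0)
--     for L in sorted({len(w) for w in counts}):
--         for i in range(n - L + 1):
--             w = text[i:i + L]
--             if w in counts and next_start[w] <= i:
--                 counts[w] += 1
--                 next_start[w] = i + L
--     return {'scorep': sum(counts[w] for w in lpos),
--             'scoren': sum(counts[w] for w in lneg)}
-- ===== Notes on version B (the rewrite author's own statement) =====
-- stated objective: faster
-- what changed: B replaces A's per-word str.count scans of the text by one shared pass per distinct word length that hashes the slice at each start position into a dict of all words, counting greedily non-overlapping occurrences per word.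
import Mathlib
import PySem

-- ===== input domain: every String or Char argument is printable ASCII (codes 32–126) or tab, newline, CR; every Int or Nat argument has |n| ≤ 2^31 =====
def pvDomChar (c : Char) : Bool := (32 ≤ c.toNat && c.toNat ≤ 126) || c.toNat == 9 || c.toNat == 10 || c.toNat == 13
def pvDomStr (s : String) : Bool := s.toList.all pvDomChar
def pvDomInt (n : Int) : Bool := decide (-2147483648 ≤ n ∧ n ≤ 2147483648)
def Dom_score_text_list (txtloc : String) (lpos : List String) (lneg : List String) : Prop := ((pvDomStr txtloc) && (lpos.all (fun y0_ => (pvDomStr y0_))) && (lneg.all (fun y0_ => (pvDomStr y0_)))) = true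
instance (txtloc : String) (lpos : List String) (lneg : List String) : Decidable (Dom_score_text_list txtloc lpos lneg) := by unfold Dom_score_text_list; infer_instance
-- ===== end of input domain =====

-- B replaces A's per-word str.count scans of the text by one shared pass per distinct word
-- length that hashes the slice at each start position into a dict of all words, counting
-- greedily non-overlapping occurrences per word.

-- ===== PORT A =====
def score_text_list (txtloc : String) (lpos : List String) (lneg : List String) : List (String × Int) :=
  let txtlocl := PySem.Str.lower txtloc
  let scorep : Int := lpos.foldl (fun acc wpos => acc + (PySem.Str.count txtlocl wpos : Int)) 0
  let scoren : Int := lneg.foldl (fun acc wneg => acc + (PySem.Str.count txtlocl wneg : Int)) 0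
  [("scorep", scorep), ("scoren", scoren)]

-- ===== PORT B =====
-- the body of Source B's inner loop over the pair (counts, next_start);
-- text[i:i+L] is ported as (text.drop i).take L (exact for these non-negative bounds)
def pvScanStep (t : List Char) (L i : Nat)
    (s : PySem.Dict (List Char) Nat × PySem.Dict (List Char) Nat) :
    PySem.Dict (List Char) Nat × PySem.Dict (List Char) Nat :=
  let w := (t.drop i).take L
  match s.1.get? w with               -- 'w in counts'
  | some c =>
    match s.2.get? w with             -- 'next_start[w]' (same keys as counts, never raises)
    | some ns => if ns ≤ i then (s.1.insert w (c + 1), s.2.insert w (i + L)) else s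
    | none => s
  | none => s

def score_text_list_alt (txtloc : String) (lpos : List String) (lneg : List String) : List (String × Int) :=
  let text := PySem.Chars.lower txtloc.toList
  let n := text.length
  -- counts = dict.fromkeys(lpos + lneg, 0); next_start = dict.fromkeys(counts, 0)
  let counts := ((lpos ++ lneg).map String.toList).foldl
      (fun d w => d.insert w (0 : Nat)) PySem.Dict.empty
  let nextStart := counts.keys.foldl (fun d w => d.insert w (0 : Nat)) PySem.Dict.empty
  -- for L in sorted({len(w) for w in counts}): for i in range(n - L + 1): …
  -- range(n - L + 1) is List.range (n + 1 - L): both empty once L exceeds n + 1 - 0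
  let fin := (PySem.List.sorted (PySem.Set.ofList (counts.keys.map List.length)) (fun x => x) false).foldl
      (fun s L => (List.range (n + 1 - L)).foldl (fun s i => pvScanStep text L i s) s)
      (counts, nextStart)
  -- every w of lpos/lneg is a key of counts, so counts[w] never raises; ported with getD
  [("scorep", (lpos.map (fun w => ((fin.1.getD w.toList 0 : Nat) : Int))).sum),
   ("scoren", (lneg.map (fun w => ((fin.1.getD w.toList 0 : Nat) : Int))).sum)]

-- ===== PRECONDITION & SPEC =====
def Spec_score_text_list (txtloc : String) (lpos : List String) (lneg : List String) (out : List (String × Int)) : Prop := out = score_text_list_alt txtloc lpos lneg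
instance (txtloc : String) (lpos : List String) (lneg : List String) (out : List (String × Int)) : Decidable (Spec_score_text_list txtloc lpos lneg out) := by unfold Spec_score_text_list; infer_instance

-- ===== CLAIM (what is proved, stated in full; the proofs are below) =====
def Claim_equal_score_text_list : Prop := ∀ (txtloc : String) (lpos : List String) (lneg : List String), Dom_score_text_list txtloc lpos lneg → Spec_score_text_list txtloc lpos lneg (score_text_list txtloc lpos lneg)

-- ===== LEMMAS AND PROOFS =====

-- clean non-overlapping count of a pattern, the bridge between the two ports
def pvCnt (w : List Char) : List Char → Nat
  | [] => 0
  | c :: rest =>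
    if w.isPrefixOf (c :: rest) then pvCnt w (rest.drop (w.length - 1)) + 1 else pvCnt w rest
termination_by l => l.length
decreasing_by
  all_goals simp only [List.length_cons, List.length_drop]
  all_goals omega

theorem pvCnt_nil (w : List Char) : pvCnt w [] = 0 := by rw [pvCnt.eq_def]

theorem pvCnt_cons (w : List Char) (c : Char) (rest : List Char) :
    pvCnt w (c :: rest) =
      if w.isPrefixOf (c :: rest) then pvCnt w (rest.drop (w.length - 1)) + 1
      else pvCnt w rest := by
  rw [pvCnt.eq_def]

theorem pvCnt_short (w : List Char) :
    ∀ (l : List Char), l.length < w.length → pvCnt w l = 0 := by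
  intro l
  induction l with
  | nil => intro _; exact pvCnt_nil w
  | cons c rest ih =>
    intro hl
    rw [pvCnt_cons, if_neg, ih (by simp at hl; omega)]
    intro hp
    have := (List.isPrefixOf_iff_prefix.mp hp).length_le
    simp at hl this
    omega

theorem pvCnt_go (w : List Char) (hw : w ≠ []) :
    ∀ (f : Nat) (l : List Char) (acc : Nat), l.length ≤ f →
      PySem.Chars.count.go w f l acc = acc + pvCnt w l := by
  have hw1 : 0 < w.length := List.length_pos_iff.mpr hw
  intro f
  induction f with
  | zero =>
    intro l acc hl
    have : l = [] := List.eq_nil_of_length_eq_zero (Nat.le_zero.mp hl)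
    subst this; simp [PySem.Chars.count.go, pvCnt_nil]
  | succ f ih =>
    intro l acc hl
    match l with
    | [] => simp [PySem.Chars.count.go, pvCnt_nil]
    | c :: rest =>
      rw [PySem.Chars.count.go]
      by_cases hp : w.isPrefixOf (c :: rest)
      · simp only [hp, if_true]
        have hlen : (List.drop w.length (c :: rest)).length ≤ f := by
          simp at hl ⊢; omega
        rw [ih _ _ hlen]
        have hdrop : List.drop w.length (c :: rest) = rest.drop (w.length - 1) := by
          cases w with
          | nil => exact absurd rfl hw
          | cons a as => simp
        rw [hdrop, pvCnt_cons, if_pos hp]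
        omega
      · have hlen : rest.length ≤ f := by simp at hl; omega
        simp only [hp, Bool.false_eq_true, if_false, ih _ _ hlen, pvCnt_cons]

theorem count_eq_pvCnt (w l : List Char) (hw : w ≠ []) :
    PySem.Chars.count l w = pvCnt w l := by
  rw [PySem.Chars.count]
  simp [List.isEmpty_iff, hw]
  have := pvCnt_go w hw l.length l 0 (le_refl _)
  omega

-- Source B's slice test at position i is exactly the prefix test on the dropped text
theorem pvTake_iff (w t : List Char) (i : Nat) :
    (t.drop i).take w.length = w ↔ w.isPrefixOf (t.drop i) = true := by
  rw [List.isPrefixOf_iff_prefix, List.prefix_iff_eq_take]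
  exact ⟨fun h => h.symm, fun h => h.symm⟩

-- one position's effect on one word's (next-allowed, count) state
def pvStepW (t w : List Char) (st : Nat × Nat) (i : Nat) : Nat × Nat :=
  if w.isPrefixOf (t.drop i) ∧ st.1 ≤ i then (i + w.length, st.2 + 1) else st

-- the joint (next_start, counts) state of one word in the dict pair
def pvView (s : PySem.Dict (List Char) Nat × PySem.Dict (List Char) Nat) (w : List Char) :
    Option (Nat × Nat) :=
  match s.2.get? w, s.1.get? w with
  | some ns, some c => some (ns, c)
  | _, _ => none

-- the initial dicts: every word of the list maps to 0
theorem pvInit_get? (l : List (List Char)) :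
    ∀ (d : PySem.Dict (List Char) Nat) (w : List Char),
      (l.foldl (fun d w => d.insert w (0 : Nat)) d).get? w =
        if w ∈ l then some 0 else d.get? w := by
  induction l with
  | nil => intro d w; simp
  | cons x rest ih =>
    intro d w
    simp only [List.foldl_cons, ih, PySem.Dict.get?_insert]
    by_cases hm : w ∈ rest
    · simp [hm]
    · by_cases hx : w = x <;> simp [hm, hx]

-- a step at a full-length position of length L ≠ |w| never touches w's entry in either dict
theorem pvScanStep_view_ne (t : List Char) (L i : Nat)
    (s : PySem.Dict (List Char) Nat × PySem.Dict (List Char) Nat)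
    (w : List Char) (hL : L ≠ w.length) (hle : i + L ≤ t.length) :
    pvView (pvScanStep t L i s) w = pvView s w := by
  rw [pvScanStep]
  have hne : w ≠ (t.drop i).take L := by
    intro h
    apply hL
    have hlen := congrArg List.length h
    have hLle : L ≤ t.length - i := by omega
    simp [List.length_take, List.length_drop, hLle] at hlen
    exact hlen.symm
  cases hg1 : s.1.get? ((t.drop i).take L) with
  | none => rfl
  | some c =>
    cases hg2 : s.2.get? ((t.drop i).take L) with
    | none => rfl
    | some ns =>
      by_cases hnxt : ns ≤ i
      · simp [hnxt, pvView, PySem.Dict.get?_insert, hne]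
      · simp [hnxt]

-- a step at length |w| acts on w's joint state as pvStepW
theorem pvScanStep_view_eq (t : List Char) (i : Nat)
    (s : PySem.Dict (List Char) Nat × PySem.Dict (List Char) Nat)
    (w : List Char) (st : Nat × Nat) (hv : pvView s w = some st) :
    pvView (pvScanStep t w.length i s) w = some (pvStepW t w st i) := by
  have hg1 : s.1.get? w = some st.2 := by
    unfold pvView at hv
    cases h2 : s.2.get? w with
    | none => rw [h2] at hv; simp at hv
    | some ns =>
      cases h1 : s.1.get? w with
      | none => rw [h2, h1] at hv; simp at hv
      | some c => rw [h2, h1] at hv; simp at hv; rw [← hv]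
  have hg2 : s.2.get? w = some st.1 := by
    unfold pvView at hv
    cases h2 : s.2.get? w with
    | none => rw [h2] at hv; simp at hv
    | some ns =>
      cases h1 : s.1.get? w with
      | none => rw [h2, h1] at hv; simp at hv
      | some c => rw [h2, h1] at hv; simp at hv; rw [← hv]
  rw [pvScanStep]
  by_cases hsub : (t.drop i).take w.length = w
  · have hpre : w.isPrefixOf (t.drop i) = true := (pvTake_iff w t i).mp hsub
    rw [hsub, hg1, hg2]
    by_cases hnxt : st.1 ≤ i
    · simp [hnxt, pvView, PySem.Dict.get?_insert_self, pvStepW, hpre]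
    · simp [hnxt, pvView, hg1, hg2, pvStepW, hpre]
  · have hne : w ≠ (t.drop i).take w.length := fun h => hsub h.symm
    have hnp : ¬ w.isPrefixOf (t.drop i) = true := fun h => hsub ((pvTake_iff w t i).mpr h)
    have hgw : pvStepW t w st i = st := by
      rw [pvStepW, if_neg]; intro hc; exact hnp hc.1
    rw [hgw]
    cases hq1 : s.1.get? ((t.drop i).take w.length) with
    | none => unfold pvView; rw [hg1, hg2]
    | some c =>
      cases hq2 : s.2.get? ((t.drop i).take w.length) with
      | none => unfold pvView; rw [hg1, hg2]
      | some ns =>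
        by_cases hnxt : ns ≤ i
        · simp only [hnxt, if_true]
          unfold pvView
          simp [PySem.Dict.get?_insert, hne, hg1, hg2]
        · simp only [hnxt, if_false]
          unfold pvView; rw [hg1, hg2]

-- a whole pass at a length L ≠ |w| leaves w's joint state alone
theorem pvPass_view_ne (t : List Char) (L : Nat) (w : List Char) (hL : L ≠ w.length) :
    ∀ (is : List Nat), (∀ i ∈ is, i + L ≤ t.length) →
      ∀ (s : PySem.Dict (List Char) Nat × PySem.Dict (List Char) Nat),
        pvView (is.foldl (fun s i => pvScanStep t L i s) s) w = pvView s w := by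
  intro is
  induction is with
  | nil => intro _ s; rfl
  | cons i rest ih =>
    intro hall s
    simp only [List.foldl_cons]
    rw [ih (fun j hj => hall j (List.mem_cons_of_mem _ hj)) _,
        pvScanStep_view_ne t L i s w hL (hall i List.mem_cons_self)]

-- the pass at length |w| acts on w's joint state as pvStepW at each position
theorem pvPass_view_eq (t : List Char) (w : List Char) :
    ∀ (is : List Nat) (s : PySem.Dict (List Char) Nat × PySem.Dict (List Char) Nat)
      (st : Nat × Nat), pvView s w = some st →
      pvView (is.foldl (fun s i => pvScanStep t w.length i s) s) w =
        some (is.foldl (pvStepW t w) st) := by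
  intro is
  induction is with
  | nil => intro s st h; simpa using h
  | cons i rest ih =>
    intro s st h
    simp only [List.foldl_cons]
    exact ih _ _ (pvScanStep_view_eq t i s w st h)

-- the fold over the distinct lengths, per word
theorem pvFold_lens (t : List Char) (w : List Char) :
    ∀ (lens : List Nat), lens.Nodup → w.length ∈ lens →
      ∀ (s : PySem.Dict (List Char) Nat × PySem.Dict (List Char) Nat)
        (st : Nat × Nat), pvView s w = some st →
        pvView (lens.foldl
            (fun s L => (List.range (t.length + 1 - L)).foldl (fun s i => pvScanStep t L i s) s)
            s) w =
          some ((List.range (t.length + 1 - w.length)).foldl (pvStepW t w) st) := by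
  have hrange : ∀ (L : Nat), ∀ i ∈ List.range (t.length + 1 - L), i + L ≤ t.length := by
    intro L i hi
    have := List.mem_range.mp hi
    omega
  intro lens
  induction lens with
  | nil => intro _ hm; simp at hm
  | cons L rest ih =>
    intro hnd hm s st hv
    obtain ⟨hLrest, hndr⟩ := List.nodup_cons.mp hnd
    simp only [List.foldl_cons]
    by_cases hL : L = w.length
    · subst hL
      have h1 := pvPass_view_eq t w (List.range (t.length + 1 - w.length)) s st hv
      -- the remaining passes have lengths ≠ |w|
      have : ∀ (rest' : List Nat), (∀ L' ∈ rest', L' ≠ w.length) →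
          ∀ s', pvView s' w = some ((List.range (t.length + 1 - w.length)).foldl (pvStepW t w) st) →
          pvView (rest'.foldl
              (fun s L' => (List.range (t.length + 1 - L')).foldl (fun s i => pvScanStep t L' i s) s)
              s') w = some ((List.range (t.length + 1 - w.length)).foldl (pvStepW t w) st) := by
        intro rest'
        induction rest' with
        | nil => intro _ s' h'; simpa using h'
        | cons L' r ihr =>
          intro hall s' h'
          simp only [List.foldl_cons]
          exact ihr (fun x hx => hall x (List.mem_cons_of_mem _ hx)) _
            (by rw [pvPass_view_ne t L' w (hall L' List.mem_cons_self) _ (hrange L'), h'])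
      exact this rest (fun L' hL' hq => hLrest (hq.symm ▸ hL')) _ h1
    · have hm' : w.length ∈ rest := by
        rcases List.mem_cons.mp hm with h | h
        · exact absurd h.symm hL
        · exact h
      refine ih hndr hm' _ st ?_
      rw [pvPass_view_ne t L w hL _ (hrange L), hv]

-- running pvStepW over the valid start positions counts exactly pvCnt from position max a nxt
theorem pvStepW_run (t w : List Char) (hw : w ≠ []) :
    ∀ (k a nxt c : Nat), a + k = t.length + 1 - w.length →
      ((List.range' a k).foldl (pvStepW t w) (nxt, c)).2 = c + pvCnt w (t.drop (max a nxt)) := by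
  have hw1 : 0 < w.length := List.length_pos_iff.mpr hw
  intro k
  induction k with
  | zero =>
    intro a nxt c ha
    have hshort : (t.drop (max a nxt)).length < w.length := by
      simp only [List.length_drop]
      omega
    simp [pvCnt_short w _ hshort]
  | succ k ih =>
    intro a nxt c ha
    have hale : a + w.length ≤ t.length := by omega
    have halt : a < t.length := by omega
    rw [List.range'_succ, List.foldl_cons]
    by_cases hcond : w.isPrefixOf (t.drop a) = true ∧ nxt ≤ a
    · obtain ⟨hpre, hnle⟩ := hcond
      have hstep : pvStepW t w (nxt, c) a = (a + w.length, c + 1) := by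
        simp [pvStepW, hpre, hnle]
      rw [hstep, ih (a + 1) (a + w.length) (c + 1) (by omega)]
      have hmax1 : max (a + 1) (a + w.length) = a + w.length := by omega
      have hmax2 : max a nxt = a := by omega
      rw [hmax1, hmax2]
      rw [List.drop_eq_getElem_cons halt] at hpre ⊢
      rw [pvCnt_cons, if_pos hpre, List.drop_drop]
      have : a + 1 + (w.length - 1) = a + w.length := by omega
      rw [this]
      omega
    · have hstep : pvStepW t w (nxt, c) a = (nxt, c) := by
        simp only [pvStepW]
        rw [if_neg]
        exact fun h => hcond ⟨h.1, h.2⟩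
      rw [hstep, ih (a + 1) nxt c (by omega)]
      by_cases hnle : nxt ≤ a
      · have hnp : ¬ w.isPrefixOf (t.drop a) = true := fun hpre => hcond ⟨hpre, hnle⟩
        have hmax1 : max (a + 1) nxt = a + 1 := by omega
        have hmax2 : max a nxt = a := by omega
        rw [hmax1, hmax2]
        rw [List.drop_eq_getElem_cons halt] at hnp ⊢
        rw [pvCnt_cons, if_neg hnp]
      · have hmax1 : max (a + 1) nxt = nxt := by omega
        have hmax2 : max a nxt = nxt := by omega
        rw [hmax1, hmax2]

-- the empty word matches at every one of the t.length + 1 start positions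
theorem pvStepW_run_nil (t : List Char) :
    ∀ (k a nxt c : Nat), nxt ≤ a →
      ((List.range' a k).foldl (pvStepW t ([] : List Char)) (nxt, c)).2 = c + k := by
  intro k
  induction k with
  | zero => intro a nxt c _; simp
  | succ k ih =>
    intro a nxt c hnxt
    rw [List.range'_succ, List.foldl_cons]
    have hstep : pvStepW t [] (nxt, c) a = (a, c + 1) := by
      simp [pvStepW, hnxt]
    rw [hstep, ih (a + 1) a (c + 1) (by omega)]
    omega

-- a word of the list ends up with exactly its Python count
theorem pvFinal_count (t : List Char) (words : List (List Char)) (w : List Char)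
    (hwm : w ∈ words) :
    ((PySem.List.sorted
        (PySem.Set.ofList
          (((words.foldl (fun d w => d.insert w (0 : Nat)) PySem.Dict.empty).keys).map List.length))
        (fun x => x) false).foldl
      (fun s L => (List.range (t.length + 1 - L)).foldl (fun s i => pvScanStep t L i s) s)
      ((words.foldl (fun d w => d.insert w (0 : Nat)) PySem.Dict.empty),
       ((words.foldl (fun d w => d.insert w (0 : Nat)) PySem.Dict.empty).keys.foldl
          (fun d w => d.insert w (0 : Nat)) PySem.Dict.empty))).1.getD w 0
      = PySem.Chars.count t w := by
  set counts0 := words.foldl (fun d w => d.insert w (0 : Nat)) PySem.Dict.empty with hc0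
  have hkeys : counts0.keys = PySem.Set.ofList words := by
    rw [hc0, PySem.Dict.keys_foldl_insert]
    rfl
  have hkmem : w ∈ counts0.keys := by
    rw [hkeys]; exact (PySem.Set.mem_ofList _ _).mpr hwm
  set lens := PySem.List.sorted (PySem.Set.ofList (counts0.keys.map List.length)) (fun x => x) false with hl0
  have hnd : lens.Nodup := by
    have hp := PySem.List.sorted_ofList_pairwise_lt (counts0.keys.map List.length)
    exact hp.imp (fun h => Nat.ne_of_lt h)
  have hlm : w.length ∈ lens := by
    rw [hl0, PySem.List.mem_sorted, PySem.Set.mem_ofList]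
    exact List.mem_map.mpr ⟨w, hkmem, rfl⟩
  have hinit1 : counts0.get? w = some 0 := by
    rw [hc0, pvInit_get?]; simp [hwm]
  have hinit2 : (counts0.keys.foldl (fun d w => d.insert w (0 : Nat)) PySem.Dict.empty).get? w
      = some 0 := by
    rw [pvInit_get?]; simp [hkmem]
  have hview : pvView (counts0,
      counts0.keys.foldl (fun d w => d.insert w (0 : Nat)) PySem.Dict.empty) w = some (0, 0) := by
    unfold pvView; rw [hinit1, hinit2]
  have hfin := pvFold_lens t w lens hnd hlm _ (0, 0) hview
  set fin := lens.foldl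
      (fun s L => (List.range (t.length + 1 - L)).foldl (fun s i => pvScanStep t L i s) s)
      (counts0, counts0.keys.foldl (fun d w => d.insert w (0 : Nat)) PySem.Dict.empty) with hf0
  have hget1 : fin.1.get? w
      = some ((List.range (t.length + 1 - w.length)).foldl (pvStepW t w) (0, 0)).2 := by
    unfold pvView at hfin
    cases h2 : fin.2.get? w with
    | none => rw [h2] at hfin; simp at hfin
    | some ns =>
      cases h1 : fin.1.get? w with
      | none => rw [h2, h1] at hfin; simp at hfin
      | some c =>
        rw [h2, h1] at hfin; simp at hfin
        rw [← hfin]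
  rw [PySem.Dict.getD, hget1]
  simp only [Option.getD_some]
  rw [List.range_eq_range']
  by_cases hw : w = []
  · subst hw
    rw [pvStepW_run_nil t (t.length + 1 - List.length []) 0 0 0 (le_refl 0)]
    rw [PySem.Chars.count]
    simp
  · rw [pvStepW_run t w hw (t.length + 1 - w.length) 0 0 0 (by omega)]
    simp [count_eq_pvCnt w t hw]

theorem pvFoldl_add_count (f : String → Nat) :
    ∀ (l : List String) (acc : Int),
      l.foldl (fun a w => a + (f w : Int)) acc = acc + ((l.map f).sum : Int) := by
  intro l
  induction l with
  | nil => intro acc; simp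
  | cons w rest ih =>
    intro acc
    simp only [List.foldl_cons, List.map_cons, List.sum_cons, ih]
    push_cast
    ring

-- ===== VERDICT (by name: the statement is the Claim_ definition above) =====
theorem score_text_list_spec : Claim_equal_score_text_list := by
  intro txt lpos lneg _
  unfold Spec_score_text_list score_text_list score_text_list_alt
  dsimp only
  rw [pvFoldl_add_count, pvFoldl_add_count]
  have hcount : ∀ (l : List String), (∀ w ∈ l, w ∈ lpos ++ lneg) →
      (l.map (fun w =>
        ((((PySem.List.sorted
              (PySem.Set.ofList
                ((((((lpos ++ lneg).map String.toList).foldl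
                    (fun d w => d.insert w (0 : Nat)) PySem.Dict.empty).keys).map List.length)))
              (fun x => x) false).foldl
            (fun s L => (List.range ((PySem.Chars.lower txt.toList).length + 1 - L)).foldl
              (fun s i => pvScanStep (PySem.Chars.lower txt.toList) L i s) s)
            ((((lpos ++ lneg).map String.toList).foldl
                (fun d w => d.insert w (0 : Nat)) PySem.Dict.empty),
             ((((lpos ++ lneg).map String.toList).foldl
                (fun d w => d.insert w (0 : Nat)) PySem.Dict.empty).keys.foldl
                (fun d w => d.insert w (0 : Nat)) PySem.Dict.empty))).1.getD w.toList 0 : Nat) : Int)))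
        = l.map (fun w => ((PySem.Str.count (PySem.Str.lower txt) w : Nat) : Int)) := by
    intro l hsub
    apply List.map_congr_left
    intro w hwl
    have hwm : w.toList ∈ (lpos ++ lneg).map String.toList :=
      List.mem_map.mpr ⟨w, hsub w hwl, rfl⟩
    have := pvFinal_count (PySem.Chars.lower txt.toList) ((lpos ++ lneg).map String.toList)
      w.toList hwm
    rw [this, PySem.Str.count, PySem.Str.toList_lower]
  rw [hcount lpos (fun w hw => List.mem_append.mpr (Or.inl hw)),
      hcount lneg (fun w hw => List.mem_append.mpr (Or.inr hw))]
  simp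
  constructor <;>
    exact congrArg List.sum (List.map_congr_left (fun w _ => by
      simp [Function.comp_apply, PySem.Str.count, PySem.Str.toList_lower]))
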